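-- pv_equiv track=rewrite | github.com/rpmci/advent-of-code | 2024/day-19/solution.py | part1
-- ===== SOURCE A (Python) =====
-- from collections import defaultdict
-- from functools import cache
--
-- def part1(lines):
--     lines = lines.split("\n\n")
--     patterns = lines[1].split()
--     towels = defaultdict(list)
--
--     for t in lines[0].split(", "):
--         towels[t[0]].append(t)
--
--     @cache
--     def can_make(p):
--         results = []
--         for chain in towels[p[0]]:
--             if p == chain:
--                 return True
--             elif p.startswith(chain):
--                 results.append(can_make(p[len(chain):]))
--         return any(results)
--
--     return sum([can_make(p) for p in patterns])
-- ===== SOURCE B (Python) =====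
-- def part1(lines):
--     parts = lines.split("\n\n")
--     towels = parts[0].split(", ")
--     total = 0
--     for p in parts[1].split():
--         n = len(p)
--         dp = [False] * (n + 1)
--         dp[n] = True
--         for i in range(n - 1, -1, -1):
--             dp[i] = any(p.startswith(t, i) and dp[i + len(t)] for t in towels)
--         total += dp[0]
--     return total
-- ===== Notes on version B (the rewrite author's own statement) =====
-- stated objective: simpler
-- what changed: Replaces the memoized recursive helper over a first-character-bucketed defaultdict with a bottom-up boolean DP table per pattern (dp[i] = suffix p[i:] is makable, filled right-to-left over the plain towel list).
-- outside the precondition, e.g. on part1('\n\n'): A raises IndexError, B returns 0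
import Mathlib
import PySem

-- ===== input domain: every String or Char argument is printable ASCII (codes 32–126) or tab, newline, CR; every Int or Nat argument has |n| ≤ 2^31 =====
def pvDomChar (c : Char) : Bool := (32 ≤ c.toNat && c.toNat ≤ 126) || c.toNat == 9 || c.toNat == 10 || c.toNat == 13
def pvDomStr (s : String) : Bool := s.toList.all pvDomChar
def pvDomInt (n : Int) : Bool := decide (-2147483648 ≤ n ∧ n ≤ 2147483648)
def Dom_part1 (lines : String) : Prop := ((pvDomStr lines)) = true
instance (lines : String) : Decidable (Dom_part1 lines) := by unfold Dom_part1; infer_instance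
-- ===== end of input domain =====

-- B replaces A's memoized recursion over a first-character-bucketed dict by a bottom-up
-- per-pattern DP table filled right-to-left (objective: simpler decomposition, same cost class).

-- ===== PORT A =====
-- inner `for chain in towels[p[0]]` loop of can_make, with Python's early `return True`
def pvGoA (p : List Char) (recur : List Char → Bool) : List (List Char) → List Bool → Bool
  | [], results => results.any id
  | chain :: rest, results =>
    if p = chain then true
    else if PySem.Chars.startswith p chain then
      pvGoA p recur rest (results ++ [recur (p.drop chain.length)])
    else pvGoA p recur rest results

-- can_make, fuel-bounded (fuel p.length+1 suffices: each recursion strictly shortens p);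
-- @cache is pure memoization and does not change the value.  p[0] on an empty p would raise
-- in Python; it never happens on reachable calls (patterns come from split()), headD is benign.
def pvCanMakeA (towels : PySem.Dict Char (List (List Char))) : Nat → List Char → Bool
  | 0, _ => false
  | f + 1, p => pvGoA p (pvCanMakeA towels f) (towels.getD (p.head?.getD ' ') []) []

def part1 (lines : String) : Int :=
  let parts := PySem.Chars.splitOn lines.toList "\n\n".toList
  match parts[1]? with
  | none => 0  -- Python raises IndexError here; excluded by Pre_part1
  | some sec =>
    let patterns := PySem.Chars.split₀ sec
    -- towels[t[0]].append(t); t[0] raises on an empty towel (excluded by Pre_part1), headD is benign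
    let towels := (PySem.Chars.splitOn (parts.headD []) ", ".toList).foldl
      (fun d t => d.modify (t.head?.getD ' ') [] (· ++ [t])) PySem.Dict.empty
    patterns.foldl (fun acc p => acc + (if pvCanMakeA towels (p.length + 1) p then (1 : Int) else 0)) 0

-- ===== PORT B =====
def part1_alt (lines : String) : Int :=
  let parts := PySem.Chars.splitOn lines.toList "\n\n".toList
  match parts[1]? with
  | none => 0
  | some sec =>
    let towels := PySem.Chars.splitOn (parts.headD []) ", ".toList
    (PySem.Chars.split₀ sec).foldl (fun total p =>
      let n := p.length
      let dp0 := (List.replicate (n + 1) false).set n true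
      -- p.startswith(t, i) with 0 ≤ i ≤ len(p) is exactly: t is a prefix of p[i:]
      let dp := (PySem.List.pyRange ((n : Int) - 1) (-1) (-1)).foldl
        (fun dp i => dp.set i.toNat
          (towels.any fun t =>
            PySem.Chars.startswith (p.drop i.toNat) t && dp.getD (i.toNat + t.length) false)) dp0
      total + (if dp.getD 0 false then 1 else 0)) 0

-- ===== PRECONDITION & SPEC =====
-- Pre_ excludes exactly the inputs where Python A raises: no "\n\n" separator (IndexError on
-- lines[1]) or an empty towel in the first section (IndexError on t[0]).
def Pre_part1 (lines : String) : Prop :=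
  2 ≤ (PySem.Chars.splitOn lines.toList "\n\n".toList).length ∧
  ∀ t ∈ PySem.Chars.splitOn ((PySem.Chars.splitOn lines.toList "\n\n".toList).headD []) ", ".toList, t ≠ []
instance (lines : String) : Decidable (Pre_part1 lines) := by unfold Pre_part1; infer_instance

def pvWitness_part1 : String := "r, g, rg\n\nrg gg b"

def Spec_part1 (lines : String) (out : Int) : Prop := out = part1_alt lines
instance (lines : String) (out : Int) : Decidable (Spec_part1 lines out) := by unfold Spec_part1; infer_instance

-- ===== CLAIM (what is proved, stated in full; the proofs are below) =====
def Claim_equal_part1 : Prop := ∀ (lines : String), Dom_part1 lines → Pre_part1 lines → Spec_part1 lines (part1 lines)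

-- ===== LEMMAS AND PROOFS =====

-- reference recursion: "p is a concatenation of (nonempty) towels", fuel-bounded
def pvCanS (ts : List (List Char)) : Nat → List Char → Bool
  | 0, _ => false
  | f + 1, p =>
    if p = [] then true
    else ts.any fun t => decide (t ≠ []) && t.isPrefixOf p && pvCanS ts f (p.drop t.length)

theorem pvCanS_fuel (ts : List (List Char)) :
    ∀ f g p, p.length < f → p.length < g → pvCanS ts f p = pvCanS ts g p := by
  intro f
  induction f with
  | zero => intro g p hf; omega
  | succ f ih =>
    intro g p hf hg
    cases g with
    | zero => omega
    | succ g =>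
      simp only [pvCanS]
      by_cases hp : p = []
      · simp [hp]
      · simp only [hp]
        refine congrArg (List.any ts) (funext fun t => ?_)
        by_cases ht : t = []
        · simp [ht]
        · by_cases hpre : t.isPrefixOf p
          · have htl : 1 ≤ t.length := by
              cases t with | nil => simp at ht | cons a l => simp
            have hple : t.length ≤ p.length :=
              (List.isPrefixOf_iff_prefix.mp hpre).length_le
            rw [ih g (p.drop t.length) (by simp only [List.length_drop]; omega) (by simp only [List.length_drop]; omega)]
          · simp [hpre]

theorem pvSplit₀_go_ne (s : List Char) :
    ∀ cur acc, (∀ w ∈ acc, w ≠ []) → ∀ w ∈ PySem.Chars.split₀.go s cur acc, w ≠ [] := by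
  induction s with
  | nil =>
    intro cur acc hacc w hw
    simp only [PySem.Chars.split₀.go] at hw
    by_cases hc : cur.isEmpty
    · simp [hc] at hw; exact hacc w hw
    · simp [hc] at hw
      rcases hw with h | h
      · exact hacc w h
      · subst h; simpa [List.isEmpty_iff] using hc
  | cons c rest ih =>
    intro cur acc hacc w hw
    simp only [PySem.Chars.split₀.go] at hw
    by_cases hsp : PySem.Chars.isspace c
    · by_cases hc : cur.isEmpty
      · simp [hsp, hc] at hw; exact ih [] acc hacc w hw
      · simp [hsp, hc] at hw
        refine ih [] (cur.reverse :: acc) ?_ w hw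
        intro v hv
        rcases List.mem_cons.mp hv with h | h
        · subst h; simpa [List.isEmpty_iff] using hc
        · exact hacc v h
    · simp [hsp] at hw; exact ih (c :: cur) acc hacc w hw

theorem pvSplit₀_ne (s : List Char) : ∀ w ∈ PySem.Chars.split₀ s, w ≠ [] := by
  intro w hw
  exact pvSplit₀_go_ne s [] [] (by simp) w hw

-- the defaultdict bucket for c is the sublist of towels whose first char is c
theorem pvBucket_eq (ts : List (List Char)) (c : Char) :
    ((ts.foldl (fun d t => d.modify (t.head?.getD ' ') [] (· ++ [t])) PySem.Dict.empty).getD c [])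
      = ts.filter (fun t => t.head?.getD ' ' == c) := by
  have h1 : ts.foldl (fun d t => d.modify (t.head?.getD ' ') [] (· ++ [t])) PySem.Dict.empty
      = (ts.map (fun t => (t.head?.getD ' ', t))).foldl
          (fun d p => d.modify p.1 [] (· ++ [p.2])) PySem.Dict.empty := by
    rw [List.foldl_map]
  rw [h1, PySem.Dict.getD_foldl_modify_append]
  simp [List.filter_map, Function.comp_def]

-- early-return elimination for the inner loop
theorem pvGoA_eq (p : List Char) (recur : List Char → Bool) :
    ∀ (chains : List (List Char)) (results : List Bool),
      pvGoA p recur chains results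
        = (results.any id
            || chains.any fun c =>
                if p = c then true else PySem.Chars.startswith p c && recur (p.drop c.length)) := by
  intro chains
  induction chains with
  | nil => intro results; simp [pvGoA]
  | cons chain rest ih =>
    intro results
    by_cases h1 : p = chain
    · simp [pvGoA, h1]
    · by_cases h2 : PySem.Chars.startswith p chain
      · simp [pvGoA, h1, h2, ih, List.any_append, Bool.or_assoc]
      · simp [pvGoA, h1, h2, ih]

theorem pvCanMakeA_eq (ts : List (List Char)) (hne : ∀ t ∈ ts, t ≠ []) :
    ∀ (f : Nat) (p : List Char), p.length < f → p ≠ [] →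
      pvCanMakeA (ts.foldl (fun d t => d.modify (t.head?.getD ' ') [] (· ++ [t])) PySem.Dict.empty) f p
        = pvCanS ts f p := by
  intro f
  induction f with
  | zero => intro p hf; omega
  | succ f ih =>
    intro p hf hp
    rw [pvCanMakeA, pvGoA_eq, pvBucket_eq]
    rw [pvCanS]
    simp only [List.any_nil, Bool.false_or, if_neg hp]
    rw [Bool.eq_iff_iff]
    simp only [List.any_eq_true, List.mem_filter]
    constructor
    · rintro ⟨t, ⟨hmem, hhead⟩, hval⟩
      refine ⟨t, hmem, ?_⟩
      have htne := hne t hmem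
      by_cases heq : p = t
      · subst heq
        have : p.length ≥ 1 := by cases p with | nil => simp at hp | cons a l => simp
        cases f with
        | zero => omega
        | succ f' =>
          simp [htne, List.isPrefixOf_iff_prefix, pvCanS]
      · simp only [if_neg heq] at hval
        have hsw : PySem.Chars.startswith p t = true := by
          cases hb : PySem.Chars.startswith p t <;> simp [hb] at hval ⊢
        have hprefix : t <+: p := (PySem.Chars.startswith_iff p t).mp hsw
        have hrec : pvCanMakeA (ts.foldl (fun d t => d.modify (t.head?.getD ' ') [] (· ++ [t])) PySem.Dict.empty) f (p.drop t.length) = true := by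
          cases hb : PySem.Chars.startswith p t <;> simp [hb] at hval; exact hval
        have htl : 1 ≤ t.length := by cases t with | nil => simp at htne | cons a l => simp
        have hlt : t.length < p.length := by
          have := hprefix.length_le
          rcases lt_or_eq_of_le this with h | h
          · exact h
          · exact absurd (hprefix.eq_of_length h).symm heq
        have hdropne : p.drop t.length ≠ [] := by
          intro hcon
          have := congrArg List.length hcon
          simp at this; omega
        rw [ih (p.drop t.length) (by simp; omega) hdropne] at hrec
        simp [htne, List.isPrefixOf_iff_prefix, hprefix, hrec]
    · rintro ⟨t, hmem, hval⟩
      have htne := hne t hmem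
      have hprefix : t <+: p := by
        cases hb : t.isPrefixOf p
        · simp [hb] at hval
        · exact List.isPrefixOf_iff_prefix.mp hb
      have hrec : pvCanS ts f (p.drop t.length) = true := by
        simp [htne, List.isPrefixOf_iff_prefix, hprefix] at hval; exact hval
      have hhead : t.head?.getD ' ' = p.head?.getD ' ' := by
        cases t with
        | nil => simp at htne
        | cons a l =>
          rcases hprefix with ⟨u, hu⟩
          subst hu; rfl
      refine ⟨t, ⟨hmem, by simp [hhead]⟩, ?_⟩
      by_cases heq : p = t
      · simp [heq]
      · have hsw : PySem.Chars.startswith p t = true := (PySem.Chars.startswith_iff p t).mpr hprefix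
        have htl : 1 ≤ t.length := by cases t with | nil => simp at htne | cons a l => simp
        have hlt : t.length < p.length := by
          have := hprefix.length_le
          rcases lt_or_eq_of_le this with h | h
          · exact h
          · exact absurd (hprefix.eq_of_length h).symm heq
        have hdropne : p.drop t.length ≠ [] := by
          intro hcon
          have := congrArg List.length hcon
          simp at this; omega
        rw [if_neg heq, hsw, ih (p.drop t.length) (by simp; omega) hdropne, hrec]
        rfl

-- B's backward sweep: folding the countdown range maintains dp[j] = "suffix p[j:] makable"
theorem pvDpFold (ts : List (List Char)) (hne : ∀ t ∈ ts, t ≠ []) (p : List Char) :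
    ∀ (i : Nat), i ≤ p.length → ∀ (dp : List Bool), dp.length = p.length + 1 →
      (∀ j : Nat, j ≤ p.length →
        dp.getD j false
          = if i ≤ j then pvCanS ts (p.length + 1) (p.drop j) else false) →
      ∀ j : Nat, j ≤ p.length →
        ((PySem.List.pyRange ((i : Int) - 1) (-1) (-1)).foldl
          (fun dp k => dp.set k.toNat
            (ts.any fun t =>
              PySem.Chars.startswith (p.drop k.toNat) t && dp.getD (k.toNat + t.length) false)) dp).getD j false
          = pvCanS ts (p.length + 1) (p.drop j) := by
  intro i
  induction i with
  | zero =>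
    intro _ dp hlen hdp j hj
    rw [PySem.List.pyRange_neg_one_eq_nil (by omega)]
    simpa using hdp j hj
  | succ i ih =>
    intro hi dp hlen hdp j hj
    have hstep : PySem.List.pyRange ((i : Int) + 1 - 1) (-1) (-1)
        = ((i : Int)) :: PySem.List.pyRange ((i : Int) - 1) (-1) (-1) := by
      have := PySem.List.pyRange_neg_one_cons (a := (i : Int)) (b := -1) (by omega)
      simpa using this
    have hcast : ((i : Int) + 1 - 1) = ((i : Int)) := by ring
    rw [show ((i + 1 : Nat) : Int) - 1 = (i : Int) + 1 - 1 by push_cast; ring, hstep]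
    simp only [List.foldl_cons, Int.toNat_natCast]
    set val := (ts.any fun t =>
      PySem.Chars.startswith (p.drop i) t && dp.getD (i + t.length) false) with hval
    have hvaleq : val = pvCanS ts (p.length + 1) (p.drop i) := by
      have hilt : i < p.length := by omega
      have hdropne : p.drop i ≠ [] := by
        intro hcon
        have := congrArg List.length hcon
        simp at this; omega
      rw [pvCanS, if_neg hdropne, hval]
      rw [Bool.eq_iff_iff]
      simp only [List.any_eq_true]
      constructor
      · rintro ⟨t, hmem, hv⟩
        have htne := hne t hmem
        have hsw : PySem.Chars.startswith (p.drop i) t = true := by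
          cases hb : PySem.Chars.startswith (p.drop i) t <;> simp [hb] at hv ⊢
        have hprefix : t <+: p.drop i := (PySem.Chars.startswith_iff _ t).mp hsw
        have htl : 1 ≤ t.length := by cases t with | nil => simp at htne | cons a l => simp
        have htle : t.length ≤ p.length - i := by
          have := hprefix.length_le; simp at this; omega
        have hdpv : dp.getD (i + t.length) false = true := by
          rw [hsw] at hv; simpa using hv
        rw [hdp (i + t.length) (by omega), if_pos (by omega)] at hdpv
        refine ⟨t, hmem, ?_⟩
        have hdd : (p.drop i).drop t.length = p.drop (i + t.length) := by
          rw [List.drop_drop]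
        have hfuel : pvCanS ts (p.length + 1) (p.drop (i + t.length))
            = pvCanS ts p.length (p.drop (i + t.length)) := by
          exact pvCanS_fuel ts _ _ _ (by simp only [List.length_drop]; omega) (by simp only [List.length_drop]; omega)
        have hip : t.isPrefixOf (p.drop i) = true := List.isPrefixOf_iff_prefix.mpr hprefix
        rw [hip, hdd, ← hfuel, hdpv]
        simp [htne]
      · rintro ⟨t, hmem, hv⟩
        have htne := hne t hmem
        have hprefix : t <+: p.drop i := by
          cases hb : t.isPrefixOf (p.drop i)
          · simp [hb] at hv
          · exact List.isPrefixOf_iff_prefix.mp hb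
        have hrec : pvCanS ts p.length (p.drop (i + t.length)) = true := by
          simp only [List.drop_drop] at hv
          simpa [htne, List.isPrefixOf_iff_prefix, hprefix, Nat.add_comm] using hv
        have htl : 1 ≤ t.length := by cases t with | nil => simp at htne | cons a l => simp
        have htle : t.length ≤ p.length - i := by
          have := hprefix.length_le; simp at this; omega
        have hsw : PySem.Chars.startswith (p.drop i) t = true :=
          (PySem.Chars.startswith_iff _ t).mpr hprefix
        have hdd : (p.drop i).drop t.length = p.drop (i + t.length) := by
          rw [List.drop_drop]
        have hfuel : pvCanS ts p.length (p.drop (i + t.length))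
            = pvCanS ts (p.length + 1) (p.drop (i + t.length)) := by
          exact pvCanS_fuel ts _ _ _ (by simp only [List.length_drop]; omega) (by simp only [List.length_drop]; omega)
        refine ⟨t, hmem, ?_⟩
        rw [hsw]
        rw [hfuel] at hrec
        rw [hdp (i + t.length) (by omega), if_pos (by omega), hrec]
        rfl
    apply ih (by omega)
    · simp [hlen]
    · intro j hj'
      by_cases hji : j = i
      · subst hji
        rw [List.getD_eq_getElem?_getD, List.getElem?_set_self (by omega)]
        simp [hvaleq]
      · rw [List.getD_eq_getElem?_getD, List.getElem?_set_ne (by omega)]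
        rw [← List.getD_eq_getElem?_getD, hdp j hj']
        by_cases h1 : i ≤ j
        · rw [if_pos (by omega), if_pos (by omega)]
        · rw [if_neg (by omega), if_neg (by omega)]
    · exact hj

-- per-pattern agreement
theorem pvPattern_eq (ts : List (List Char)) (hne : ∀ t ∈ ts, t ≠ []) (p : List Char) (hp : p ≠ []) :
    ((PySem.List.pyRange ((p.length : Int) - 1) (-1) (-1)).foldl
      (fun dp i => dp.set i.toNat
        (ts.any fun t =>
          PySem.Chars.startswith (p.drop i.toNat) t && dp.getD (i.toNat + t.length) false))
      ((List.replicate (p.length + 1) false).set p.length true)).getD 0 false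
    = pvCanMakeA (ts.foldl (fun d t => d.modify (t.head?.getD ' ') [] (· ++ [t])) PySem.Dict.empty)
        (p.length + 1) p := by
  rw [pvCanMakeA_eq ts hne (p.length + 1) p (by omega) hp]
  have h0 := pvDpFold ts hne p p.length (le_refl _)
    ((List.replicate (p.length + 1) false).set p.length true)
    (by simp)
    (by
      intro j hj
      by_cases hjn : j = p.length
      · subst hjn
        rw [List.getD_eq_getElem?_getD, List.getElem?_set_self (by simp)]
        simp [pvCanS]
      · rw [List.getD_eq_getElem?_getD, List.getElem?_set_ne (by omega)]
        rw [if_neg (show ¬ p.length ≤ j by omega)]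
        simp [show j < p.length + 1 by omega])
    0 (by omega)
  rw [h0]
  simp

-- ===== VERDICT (by name: the statement is the Claim_ definition above) =====
theorem part1_spec : Claim_equal_part1 := by
  intro lines _ hpre
  unfold Spec_part1 part1 part1_alt
  obtain ⟨hlen, hne⟩ := hpre
  set parts := PySem.Chars.splitOn lines.toList "\n\n".toList with hparts
  have h1 : 1 < parts.length := by omega
  have hsec : parts[1]? = some parts[1] := List.getElem?_eq_getElem h1
  simp only [hsec]
  apply PySem.List.foldl_congr_mem'
  intro p hmem acc
  congr 1
  have hp : p ≠ [] := pvSplit₀_ne _ p hmem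
  rw [← pvPattern_eq (PySem.Chars.splitOn (parts.headD []) ", ".toList) hne p hp]
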